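-- pv_equiv track=rewrite | github.com/tanishqtyagii/SR-Wireless-CAN | hex_parse.py | build_erase_frames
-- ===== SOURCE A (Python) =====
-- DEFAULT_NODE = 0x01
--
-- def _u32_to_be_bytes(value: int) -> list[int]:
--     value &= 0xFFFFFFFF
--     return [
--         (value >> 24) & 0xFF,
--         (value >> 16) & 0xFF,
--         (value >> 8) & 0xFF,
--         value & 0xFF,
--     ]
--
-- def _u16_to_be_bytes(value: int) -> list[int]:
--     value &= 0xFFFF
--     return [(value >> 8) & 0xFF, value & 0xFF]
--
-- def build_erase_frames(base_addr: int, total_size: int, node_id: int = DEFAULT_NODE) -> list[list[int]]: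
--     frames: list[list[int]] = []
--     remaining = total_size
--     addr = base_addr
--
--     while remaining > 0:
--         block = min(0x10000, remaining)
--         frames.append([0x0C, node_id] + _u32_to_be_bytes(addr) + _u16_to_be_bytes(block - 1))
--         addr += block
--         remaining -= block
--
--     return frames
-- ===== SOURCE B (Python) =====
-- DEFAULT_NODE = 0x01
--
-- def _u32_to_be_bytes(value: int) -> list[int]:
--     value &= 0xFFFFFFFF
--     return [
--         (value >> 24) & 0xFF,
--         (value >> 16) & 0xFF,
--         (value >> 8) & 0xFF,
--         value & 0xFF,
--     ]
--
-- def _u16_to_be_bytes(value: int) -> list[int]: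
--     value &= 0xFFFF
--     return [(value >> 8) & 0xFF, value & 0xFF]
--
-- def build_erase_frames(base_addr: int, total_size: int, node_id: int = DEFAULT_NODE) -> list[list[int]]:
--     # Peel blocks off the END of the region (the possibly-partial block first),
--     # emitting frames back-to-front, then reverse once at the end.
--     frames: list[list[int]] = []
--     size = total_size
--     while size > 0:
--         last = size % 0x10000 or 0x10000
--         size -= last
--         frames.append([0x0C, node_id] + _u32_to_be_bytes(base_addr + size) + _u16_to_be_bytes(last - 1))
--     frames.reverse()
--     return frames
-- ===== Notes on version B (the rewrite author's own statement) =====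
-- stated objective: alternative
-- what changed: B traverses the region in the opposite direction: it peels blocks off the END (the possibly-partial block first, via size % 0x10000 or 0x10000), emitting frames back-to-front with addresses base_addr + size, and reverses the list once at the end; A walks forward with running addr/remaining accumulators and min().
import Mathlib
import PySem

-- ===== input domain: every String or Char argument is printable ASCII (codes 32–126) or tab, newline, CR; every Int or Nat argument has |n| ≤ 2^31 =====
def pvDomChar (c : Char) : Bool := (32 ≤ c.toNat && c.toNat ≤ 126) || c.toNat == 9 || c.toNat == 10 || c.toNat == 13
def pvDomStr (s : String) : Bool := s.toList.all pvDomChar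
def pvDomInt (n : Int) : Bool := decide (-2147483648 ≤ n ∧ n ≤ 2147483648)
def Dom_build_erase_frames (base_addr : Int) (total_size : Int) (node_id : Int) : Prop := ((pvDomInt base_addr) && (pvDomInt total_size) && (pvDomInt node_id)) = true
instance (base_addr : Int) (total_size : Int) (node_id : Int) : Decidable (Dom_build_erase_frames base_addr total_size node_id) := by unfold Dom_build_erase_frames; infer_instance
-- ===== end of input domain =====

-- B peels blocks off the END of the region (partial block first), emitting frames
-- back-to-front and reversing once, instead of A's forward walk with running
-- addr/remaining accumulators; an alternative traversal of the same cost.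

-- ===== PORT A =====
-- _u32_to_be_bytes: 'value &= 0xFFFFFFFF' then big-endian bytes; & and >> on a
-- nonnegative value are exact as floor-mod and floor-division by powers of two
def u32be (value : Int) : List Int :=
  let v := PySem.Int.mod value 4294967296
  [ PySem.Int.mod (PySem.Int.floordiv v 16777216) 256,
    PySem.Int.mod (PySem.Int.floordiv v 65536) 256,
    PySem.Int.mod (PySem.Int.floordiv v 256) 256,
    PySem.Int.mod v 256 ]

-- _u16_to_be_bytes
def u16be (value : Int) : List Int :=
  let v := PySem.Int.mod value 65536
  [ PySem.Int.mod (PySem.Int.floordiv v 256) 256, PySem.Int.mod v 256 ]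

-- A's while-loop, step for step on the same state (frames, addr, remaining)
def eraseLoop (node_id addr remaining : Int) (frames : List (List Int)) : List (List Int) :=
  if _h : remaining > 0 then
    let block := min 65536 remaining
    eraseLoop node_id (addr + block) (remaining - block)
      (frames ++ [[12, node_id] ++ u32be addr ++ u16be (block - 1)])
  else frames
termination_by remaining.toNat
decreasing_by simp only [min_def]; split <;> omega

def build_erase_frames (base_addr : Int) (total_size : Int) (node_id : Int) : List (List Int) :=
  eraseLoop node_id base_addr total_size []

-- ===== PORT B =====
-- B's while-loop: peel the last block (size % 0x10000 or 0x10000) off the end,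
-- appending its frame; the caller reverses the accumulated list afterwards
def altLoop (base node size : Int) (frames : List (List Int)) : List (List Int) :=
  if _h : size > 0 then
    let m := PySem.Int.mod size 65536
    let last := if m = 0 then 65536 else m   -- Python 'm or 0x10000'
    altLoop base node (size - last)
      (frames ++ [[12, node] ++ u32be (base + (size - last)) ++ u16be (last - 1)])
  else frames
termination_by size.toNat
decreasing_by
  simp only [PySem.Int.mod_eq_emod_of_pos (by norm_num : (0:Int) < 65536)]
  have := Int.emod_nonneg size (by norm_num : (65536:Int) ≠ 0)
  split <;> omega

def build_erase_frames_alt (base_addr : Int) (total_size : Int) (node_id : Int) : List (List Int) :=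
  (altLoop base_addr node_id total_size []).reverse

-- ===== PRECONDITION & SPEC =====
def Spec_build_erase_frames (base_addr : Int) (total_size : Int) (node_id : Int) (out : List (List Int)) : Prop := out = build_erase_frames_alt base_addr total_size node_id
instance (base_addr : Int) (total_size : Int) (node_id : Int) (out : List (List Int)) : Decidable (Spec_build_erase_frames base_addr total_size node_id out) := by unfold Spec_build_erase_frames; infer_instance

-- ===== CLAIM (what is proved, stated in full; the proofs are below) =====
def Claim_equal_build_erase_frames : Prop := ∀ (base_addr : Int) (total_size : Int) (node_id : Int), Dom_build_erase_frames base_addr total_size node_id → Spec_build_erase_frames base_addr total_size node_id (build_erase_frames base_addr total_size node_id)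

-- ===== LEMMAS AND PROOFS =====
lemma fmod65536 (a : Int) : PySem.Int.mod a 65536 = a % 65536 :=
  PySem.Int.mod_eq_emod_of_pos (by norm_num)

-- the size of the last (possibly partial) block
def lastBlk (r : Int) : Int := if r % 65536 = 0 then 65536 else r % 65536

lemma lastBlk_pos (r : Int) (hr : r > 0) : 0 < lastBlk r ∧ lastBlk r ≤ r := by
  unfold lastBlk; split <;> omega

lemma eraseLoop_nonpos (n b r : Int) (acc : List (List Int)) (hr : ¬ r > 0) :
    eraseLoop n b r acc = acc := by
  rw [eraseLoop]; exact dif_neg hr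

lemma eraseLoop_pos (n b r : Int) (acc : List (List Int)) (hr : r > 0) :
    eraseLoop n b r acc = eraseLoop n (b + min 65536 r) (r - min 65536 r)
      (acc ++ [[12, n] ++ u32be b ++ u16be (min 65536 r - 1)]) := by
  rw [eraseLoop]; simp [dif_pos hr]

lemma altLoop_nonpos (b n r : Int) (acc : List (List Int)) (hr : ¬ r > 0) :
    altLoop b n r acc = acc := by
  rw [altLoop]; exact dif_neg hr

lemma altLoop_pos (b n r : Int) (acc : List (List Int)) (hr : r > 0) :
    altLoop b n r acc = altLoop b n (r - lastBlk r)
      (acc ++ [[12, n] ++ u32be (b + (r - lastBlk r)) ++ u16be (lastBlk r - 1)]) := by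
  rw [altLoop]
  simp only [dif_pos hr, fmod65536]
  rfl

lemma eraseLoop_acc : ∀ (k : Nat) (n b r : Int), r.toNat ≤ k → ∀ acc,
    eraseLoop n b r acc = acc ++ eraseLoop n b r [] := by
  intro k
  induction k with
  | zero =>
    intro n b r hk acc
    have hr : ¬ r > 0 := by omega
    rw [eraseLoop_nonpos n b r acc hr, eraseLoop_nonpos n b r [] hr]; simp
  | succ k ih =>
    intro n b r hk acc
    by_cases hr : r > 0
    · rw [eraseLoop_pos n b r acc hr, eraseLoop_pos n b r [] hr]
      have hlt : (r - min 65536 r).toNat ≤ k := by simp only [min_def]; split <;> omega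
      rw [ih n (b + min 65536 r) (r - min 65536 r) hlt,
          ih n (b + min 65536 r) (r - min 65536 r) hlt ([] ++ _)]
      simp
    · rw [eraseLoop_nonpos n b r acc hr, eraseLoop_nonpos n b r [] hr]; simp

lemma altLoop_acc : ∀ (k : Nat) (b n r : Int), r.toNat ≤ k → ∀ acc,
    altLoop b n r acc = acc ++ altLoop b n r [] := by
  intro k
  induction k with
  | zero =>
    intro b n r hk acc
    have hr : ¬ r > 0 := by omega
    rw [altLoop_nonpos b n r acc hr, altLoop_nonpos b n r [] hr]; simp
  | succ k ih =>
    intro b n r hk acc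
    by_cases hr : r > 0
    · rw [altLoop_pos b n r acc hr, altLoop_pos b n r [] hr]
      have hp := lastBlk_pos r hr
      have hlt : (r - lastBlk r).toNat ≤ k := by omega
      rw [ih b n (r - lastBlk r) hlt, ih b n (r - lastBlk r) hlt ([] ++ _)]
      simp
    · rw [altLoop_nonpos b n r acc hr, altLoop_nonpos b n r [] hr]; simp

-- A's forward loop also satisfies the back-peeling recursion
lemma eraseLoop_back : ∀ (k : Nat) (n b r : Int), r.toNat ≤ k → r > 0 →
    eraseLoop n b r [] = eraseLoop n b (r - lastBlk r) [] ++
      [[12, n] ++ u32be (b + (r - lastBlk r)) ++ u16be (lastBlk r - 1)] := by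
  intro k
  induction k with
  | zero => intro n b r hk hr; omega
  | succ k ih =>
    intro n b r hk hr
    by_cases hle : r ≤ 65536
    · -- single block: lastBlk r = r
      have hl : lastBlk r = r := by unfold lastBlk; split <;> omega
      have hmin : min 65536 r = r := by omega
      rw [hl, eraseLoop_pos n b r [] hr, hmin,
          eraseLoop_nonpos n (b + r) (r - r) _ (by omega),
          eraseLoop_nonpos n b (r - r) [] (by omega)]
      simp
    · -- r > 65536: first block is full; apply IH to the tail
      have hl' : lastBlk (r - 65536) = lastBlk r := by
        unfold lastBlk
        have : (r - 65536) % 65536 = r % 65536 := by omega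
        rw [this]
      have hp := lastBlk_pos r hr
      have hge : r - lastBlk r ≥ 65536 := by unfold lastBlk at *; split at hp <;> omega
      have hmin : min 65536 r = 65536 := by omega
      rw [eraseLoop_pos n b r [] hr, hmin,
          eraseLoop_acc (r - 65536).toNat n (b + 65536) (r - 65536) le_rfl,
          ih n (b + 65536) (r - 65536) (by omega) (by omega), hl']
      conv_rhs => rw [eraseLoop_pos n b (r - lastBlk r) [] (by omega)]
      have hmin2 : min 65536 (r - lastBlk r) = 65536 := by omega
      rw [hmin2,
          eraseLoop_acc (r - lastBlk r - 65536).toNat n (b + 65536) (r - lastBlk r - 65536) le_rfl]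
      have harr : r - 65536 - lastBlk r = r - lastBlk r - 65536 := by ring
      have haddr : b + 65536 + (r - lastBlk r - 65536) = b + (r - lastBlk r) := by ring
      rw [harr, haddr]
      simp

-- B's reversed back-to-front loop equals A's forward loop
lemma alt_eq_erase : ∀ (k : Nat) (b n r : Int), r.toNat ≤ k →
    (altLoop b n r []).reverse = eraseLoop n b r [] := by
  intro k
  induction k with
  | zero =>
    intro b n r hk
    have hr : ¬ r > 0 := by omega
    rw [altLoop_nonpos b n r [] hr, eraseLoop_nonpos n b r [] hr]; simp
  | succ k ih =>
    intro b n r hk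
    by_cases hr : r > 0
    · have hp := lastBlk_pos r hr
      rw [altLoop_pos b n r [] hr,
          altLoop_acc (r - lastBlk r).toNat b n (r - lastBlk r) le_rfl,
          List.reverse_append]
      simp only [List.nil_append, List.reverse_cons, List.reverse_nil]
      rw [ih b n (r - lastBlk r) (by omega),
          eraseLoop_back r.toNat n b r le_rfl hr]
    · rw [altLoop_nonpos b n r [] hr, eraseLoop_nonpos n b r [] hr]; simp

-- ===== VERDICT (by name: the statement is the Claim_ definition above) =====
theorem build_erase_frames_spec : Claim_equal_build_erase_frames := by
  intro b t n _
  unfold Spec_build_erase_frames build_erase_frames build_erase_frames_alt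
  exact (alt_eq_erase t.toNat b n t le_rfl).symm
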